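-- pv_equiv track=rewrite | github.com/max-scw/Data-Matrix-Code-Generator-Service | DataMatrixCode/DMCText.py | split_repeating_elements
-- ===== SOURCE A (Python) =====
-- from typing import List, Union, Dict, Any
--
-- def split_repeating_elements(string: str) -> List[str]:
--     sections = []
--
--     if len(string) > 1:
--         sct = string[0]
--         for el in string[1:]:
--             if el in sct:
--                 sct += el
--             else:
--                 sections.append(sct)
--                 sct = el
--         sections.append(sct)
--     return sections
-- ===== SOURCE B (Python) =====
-- def split_repeating_elements(string):
--     # A section grows only while the char is already in it, so sections are
--     # maximal runs of identical consecutive characters; find each run with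
--     # two indices and slice it out.
--     if len(string) <= 1:
--         return []
--     out = []
--     i, n = 0, len(string)
--     while i < n:
--         j = i
--         while j < n and string[j] == string[i]:
--             j += 1
--         out.append(string[i:j])
--         i = j
--     return out
-- ===== Notes on version B (the rewrite author's own statement) =====
-- stated objective: alternative
-- what changed: Replaces A's accumulate-while-membership loop (growing a section string and testing 'el in sct') with a two-pointer scan that locates each maximal run of equal adjacent characters and slices it out directly.
import Mathlib
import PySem

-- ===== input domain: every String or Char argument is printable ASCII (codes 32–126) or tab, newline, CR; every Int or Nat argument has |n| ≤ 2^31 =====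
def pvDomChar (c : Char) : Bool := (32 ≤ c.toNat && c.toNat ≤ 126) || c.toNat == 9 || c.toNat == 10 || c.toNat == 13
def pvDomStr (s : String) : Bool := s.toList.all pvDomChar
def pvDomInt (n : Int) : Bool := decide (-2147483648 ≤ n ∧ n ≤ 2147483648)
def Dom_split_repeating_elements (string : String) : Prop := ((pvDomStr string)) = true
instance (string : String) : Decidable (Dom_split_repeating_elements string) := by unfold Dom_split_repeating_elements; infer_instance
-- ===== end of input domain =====

-- ===== PORT A =====
-- B replaces A's accumulate-while-membership loop with a two-pointer run scan (alternative, same cost).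

-- one loop step of A: 'if el in sct: sct += el else: sections.append(sct); sct = el'
-- ('el in sct' is Python single-char substring test = char membership)
def stepA (st : List (List Char) × List Char) (el : Char) : List (List Char) × List Char :=
  if st.2.contains el then (st.1, st.2 ++ [el]) else (st.1 ++ [st.2], [el])

def split_repeating_elements (string : String) : List String :=
  let cs := string.toList
  if cs.length > 1 then
    match cs with
    | [] => []
    | c :: rest =>
      let p := rest.foldl stepA ([], [c])   -- sct = string[0]; for el in string[1:]
      (p.1 ++ [p.2]).map (fun l => String.mk l)
  else []

-- ===== PORT B =====
-- inner 'while j < n and string[j] == string[i]' : split off the run of c, return (run, remainder)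
def takeRun (c : Char) : List Char → List Char × List Char
  | [] => ([], [])
  | d :: rest => if d = c then
      let p := takeRun c rest
      (d :: p.1, p.2)
    else ([], d :: rest)

theorem takeRun_snd_len (c : Char) : ∀ (l : List Char), (takeRun c l).2.length ≤ l.length := by
  intro l
  induction l with
  | nil => simp [takeRun]
  | cons d rest ih =>
    simp only [takeRun]
    split
    · simpa using Nat.le_succ_of_le ih
    · simp

-- outer 'while i < n' loop: emit the run at the front, continue on the remainder
def runsB : List Char → List (List Char)
  | [] => []
  | c :: rest =>
    let p := takeRun c rest
    (c :: p.1) :: runsB p.2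
termination_by l => l.length
decreasing_by
  exact Nat.lt_succ_of_le (takeRun_snd_len c rest)

def split_repeating_elements_alt (string : String) : List String :=
  let cs := string.toList
  if cs.length ≤ 1 then []
  else (runsB cs).map (fun l => String.mk l)

-- ===== PRECONDITION & SPEC =====
def Spec_split_repeating_elements (string : String) (out : List String) : Prop := out = split_repeating_elements_alt string
instance (string : String) (out : List String) : Decidable (Spec_split_repeating_elements string out) := by unfold Spec_split_repeating_elements; infer_instance

-- ===== CLAIM (what is proved, stated in full; the proofs are below) =====
def Claim_equal_split_repeating_elements : Prop := ∀ (string : String), Dom_split_repeating_elements string → Spec_split_repeating_elements string (split_repeating_elements string)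

-- ===== LEMMAS AND PROOFS =====

theorem runsB_nil : runsB [] = [] := by rw [runsB]

theorem runsB_cons (c : Char) (rest : List Char) :
    runsB (c :: rest) = (c :: (takeRun c rest).1) :: runsB (takeRun c rest).2 := by rw [runsB]

theorem stepA_replicate (n : Nat) (c el : Char) (acc : List (List Char)) :
    stepA (acc, List.replicate (n+1) c) el =
      if el = c then (acc, List.replicate (n+2) c) else (acc ++ [List.replicate (n+1) c], List.replicate 1 el) := by
  by_cases h : el = c
  · subst h
    simp [stepA, List.contains_eq_mem, List.mem_replicate, List.replicate_succ']
  · simp [stepA, List.contains_eq_mem, List.mem_replicate, h]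

theorem key_loop : ∀ (rest : List Char) (c : Char) (n : Nat) (acc : List (List Char)),
    (let p := rest.foldl stepA (acc, List.replicate (n+1) c);
     p.1 ++ [p.2]) =
      acc ++ (List.replicate (n+1) c ++ (takeRun c rest).1) :: runsB (takeRun c rest).2 := by
  intro rest
  induction rest with
  | nil => intro c n acc; simp [takeRun, runsB_nil]
  | cons el rest' ih =>
    intro c n acc
    simp only [List.foldl_cons, stepA_replicate]
    by_cases h : el = c
    · subst h
      simpa [takeRun, List.replicate_succ', List.append_assoc] using ih el (n+1) acc
    · have := ih el 0 (acc ++ [List.replicate (n+1) c])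
      simp only [if_neg h] at *
      rw [this]
      simp [takeRun, runsB_cons, h, List.append_assoc]

-- ===== VERDICT (by name: the statement is the Claim_ definition above) =====
theorem split_repeating_elements_spec : Claim_equal_split_repeating_elements := by
  intro s _
  unfold Spec_split_repeating_elements split_repeating_elements split_repeating_elements_alt
  simp only []
  cases h : s.toList with
  | nil => simp
  | cons c rest =>
    by_cases hl : (c :: rest).length > 1
    · have h2 : ¬ (c :: rest).length ≤ 1 := by omega
      simp only [if_pos hl, if_neg h2]
      have := key_loop rest c 0 []
      simp only [List.nil_append, List.replicate_one, Nat.zero_add] at this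
      rw [this, runsB_cons]
      simp
    · have hr : rest = [] := by
        cases rest with
        | nil => rfl
        | cons a t => simp at hl
      subst hr
      simp
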